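-- pv_equiv track=rewrite | github.com/blakefren/CrackingTheCodingInterview | chapter_5.py | five_one
-- ===== SOURCE A (Python) =====
-- def five_one(M, N, i, j):
--
--     # Get a mask to clear bits in N from j to i.
--     mask = 0
--     for k in range(j-i):  # Get the right number of 1's.
--         mask = mask ^ (1 << k)
--     for k in range(i):  # Bit shift the mask.
--         mask = mask << 1
--
--     # Apply the mask to N.
--     N = N & ~mask
--
--     # Fill in N with M.
--     N = N | (M<<i)
--
--     return N
-- ===== SOURCE B (Python) =====
-- def five_one(M, N, i, j):
--     # Closed-form mask of (j-i) ones starting at bit i, instead of bit-by-bit loops.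
--     mask = ((1 << max(j - i, 0)) - 1) << i
--     return (N & ~mask) | (M << i)
-- ===== Notes on version B (the rewrite author's own statement) =====
-- stated objective: faster
-- what changed: Replaces the two bit-by-bit loops (XOR-ing in one bit j-i times, then shifting the mask left i times) by the closed-form mask ((1 << max(j-i,0)) - 1) << i combined in one expression; intended as faster (O(1) bit ops vs O(j) iterations; a timing run measured B 2701x faster at n=65536, and at the largest probe size A timed out while B's output was too large for the harness to decode).
import Mathlib
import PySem

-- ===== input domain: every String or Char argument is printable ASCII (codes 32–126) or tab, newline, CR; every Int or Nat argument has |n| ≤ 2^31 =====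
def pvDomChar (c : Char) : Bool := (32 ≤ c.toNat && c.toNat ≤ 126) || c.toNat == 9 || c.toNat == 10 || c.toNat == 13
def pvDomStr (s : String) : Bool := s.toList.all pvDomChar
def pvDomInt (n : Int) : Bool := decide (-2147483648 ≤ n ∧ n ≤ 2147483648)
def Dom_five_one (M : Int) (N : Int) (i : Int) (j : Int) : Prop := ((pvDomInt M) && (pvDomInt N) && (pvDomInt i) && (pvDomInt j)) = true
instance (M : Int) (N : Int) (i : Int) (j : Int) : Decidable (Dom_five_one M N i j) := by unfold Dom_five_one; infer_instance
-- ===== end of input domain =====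

-- B replaces A's two bit-by-bit loops by the closed-form mask ((1 << max(j-i,0)) - 1) << i; return values proved equal on Pre_ (i >= 0; Python raises ValueError on a negative shift count).

-- Python's  a << n  (n : Nat): the core Int-by-Nat shift (used by both ports; evaluation-friendly)
def pyShl (a : Int) (n : Nat) : Int := a <<< n

-- ===== PORT A =====
def five_one (M : Int) (N : Int) (i : Int) (j : Int) : Int :=
  -- mask = 0; for k in range(j-i): mask = mask ^ (1 << k)
  let mask : Int := (PySem.List.pyRange 0 (j - i) 1).foldl
    (fun mask k => PySem.Int.bxor mask (pyShl 1 k.toNat)) 0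
  -- for k in range(i): mask = mask << 1
  let mask : Int := (PySem.List.pyRange 0 i 1).foldl (fun mask _ => pyShl mask 1) mask
  -- N = N & ~mask
  let N : Int := PySem.Int.band N (Int.not mask)
  -- N = N | (M << i)
  let N : Int := PySem.Int.bor N (pyShl M i.toNat)
  N

-- ===== PORT B =====
def five_one_alt (M : Int) (N : Int) (i : Int) (j : Int) : Int :=
  let mask : Int := pyShl (pyShl 1 (max (j - i) 0).toNat - 1) i.toNat
  PySem.Int.bor (PySem.Int.band N (Int.not mask)) (pyShl M i.toNat)

-- ===== PRECONDITION & SPEC =====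
-- Pre_ excludes i < 0, where Python's M << i raises ValueError (negative shift count) in both A and B.
def Pre_five_one (M : Int) (N : Int) (i : Int) (j : Int) : Prop := 0 ≤ i
instance (M : Int) (N : Int) (i : Int) (j : Int) : Decidable (Pre_five_one M N i j) := by unfold Pre_five_one; infer_instance
def pvWitness_five_one : Int × Int × Int × Int := (5, 1024, 2, 6)

def Spec_five_one (M : Int) (N : Int) (i : Int) (j : Int) (out : Int) : Prop := out = five_one_alt M N i j
instance (M : Int) (N : Int) (i : Int) (j : Int) (out : Int) : Decidable (Spec_five_one M N i j out) := by unfold Spec_five_one; infer_instance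

-- ===== CLAIM (what is proved, stated in full; the proofs are below) =====
def Claim_equal_five_one : Prop := ∀ (M : Int) (N : Int) (i : Int) (j : Int), Dom_five_one M N i j → Pre_five_one M N i j → Spec_five_one M N i j (five_one M N i j)

-- ===== LEMMAS AND PROOFS =====

-- (2^n - 1) ^ 2^n = 2^(n+1) - 1 on Nat (the XOR'd bit is fresh each iteration)
theorem pv_nat_xor_pow (n : Nat) : ((2:Nat)^n - 1) ^^^ 2^n = 2^(n+1) - 1 := by
  apply Nat.eq_of_testBit_eq
  intro k
  simp [Nat.testBit_xor, Nat.testBit_two_pow_sub_one, Nat.testBit_two_pow]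
  by_cases h : k < n + 1 <;> by_cases h2 : k < n <;> by_cases h3 : n = k <;> simp_all <;> omega

-- the Int version of the XOR step A's first loop performs
theorem pv_int_xor_step (n : Nat) :
    PySem.Int.bxor (pyShl 1 n - 1) (pyShl 1 n) = pyShl 1 (n+1) - 1 := by
  have h1 : (1:Nat) ≤ 2^n := Nat.one_le_two_pow
  have h2 : (1:Nat) ≤ 2^(n+1) := Nat.one_le_two_pow
  have e1 : pyShl 1 n - 1 = (((2:Nat)^n - 1 : Nat) : Int) := by
    rw [pyShl, Int.shiftLeft_eq]; push_cast [h1]; ring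
  have e2 : pyShl 1 n = (((2:Nat)^n : Nat) : Int) := by
    rw [pyShl, Int.shiftLeft_eq]; push_cast; ring
  have e3 : pyShl 1 (n+1) - 1 = (((2:Nat)^(n+1) - 1 : Nat) : Int) := by
    rw [pyShl, Int.shiftLeft_eq]; push_cast [h2]; ring
  rw [e1, e2, e3, PySem.Int.bxor_natCast, pv_nat_xor_pow]

-- A's first loop computes 2^n - 1
theorem pv_mask_loop (n : Nat) :
    List.foldl (fun (m : Int) (k : Nat) => PySem.Int.bxor m (pyShl 1 ((0:Int) + (k:Int)).toNat)) 0 (List.range n)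
      = pyShl 1 n - 1 := by
  induction n with
  | zero => simp [pyShl]
  | succ n ih =>
      rw [List.range_succ, List.foldl_append, ih]
      have : ((0:Int) + (n:Int)).toNat = n := by omega
      simp only [List.foldl_cons, List.foldl_nil, this]
      exact pv_int_xor_step n

-- A's second loop shifts left n times
theorem pv_shift_loop (m0 : Int) (n : Nat) :
    List.foldl (fun (m : Int) (_ : Nat) => pyShl m 1) m0 (List.range n) = pyShl m0 n := by
  induction n with
  | zero => simp [pyShl]
  | succ n ih =>
      rw [List.range_succ, List.foldl_append, ih]
      simp [pyShl, Int.shiftLeft_eq, pow_succ, mul_assoc]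

-- ===== VERDICT (by name: the statement is the Claim_ definition above) =====
theorem five_one_spec : Claim_equal_five_one := by
  intro M N i j _hdom hpre
  unfold Spec_five_one five_one five_one_alt
  have hmax : (max (j - i) 0).toNat = (j - i).toNat := by omega
  rw [hmax]
  simp only [PySem.List.pyRange_one, sub_zero, List.foldl_map]
  rw [pv_mask_loop, pv_shift_loop]
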